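-- pv_equiv track=rewrite | github.com/Mehechiger/M1LIS1_tal_approches_probas_prj | c3a_extract_features.py | chunk_datapair
-- ===== SOURCE A (Python) =====
-- def chunk_datapair(datapair, chunk_size):
--     assert len(datapair) == 2, "data not paired!"
--     assert all(type(data) == list
--                for data in datapair.values()
--                ), "wrong data format!"
--     assert len(set(len(data)
--                    for data in datapair.values()
--                    )) == 1, "data length not equal!"
--
--     chunks_pair = {type_: [] for type_ in datapair}
--     count = chunk_size
--     ind = -1
--     for i in range(len(datapair["src"])):
--         if count >= chunk_size:
--             count = 0
--             ind += 1
--             for type_ in chunks_pair: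
--                 chunks_pair[type_].append([])
--         for type_ in chunks_pair:
--             chunks_pair[type_][ind].append(datapair[type_][i])
--         count += min(len(datapair["src"][i]), len(datapair["ref"][i]))
--     return {type_: chunks_pair[type_] for type_ in datapair}
-- ===== SOURCE B (Python) =====
-- def chunk_datapair(datapair, chunk_size):
--     assert len(datapair) == 2, "data not paired!"
--     assert all(type(data) == list
--                for data in datapair.values()
--                ), "wrong data format!"
--     assert len(set(len(data)
--                    for data in datapair.values()
--                    )) == 1, "data length not equal!"
--
--     # Pass 1: compute the chunk index of every item from the running size count.
--     src, ref = datapair["src"], datapair["ref"]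
--     idx = []
--     count, ind = chunk_size, -1
--     for i in range(len(src)):
--         if count >= chunk_size:
--             count = 0
--             ind += 1
--         idx.append(ind)
--         count += min(len(src[i]), len(ref[i]))
--
--     # Pass 2: assemble each type's chunks from the shared index list.
--     def chunkify(data):
--         chunks = []
--         for j, x in zip(idx, data):
--             if j == len(chunks):
--                 chunks.append([])
--             chunks[-1].append(x)
--         return chunks
--
--     return {type_: chunkify(datapair[type_]) for type_ in datapair}
-- ===== Notes on version B (the rewrite author's own statement) =====
-- stated objective: alternative
-- what changed: A builds all chunks in one interleaved loop over a dict of chunk lists (boundary test, per-key empty-chunk append and per-key item append mixed per iteration); B first computes a per-item chunk-index list from the running size count, then assembles each key's chunks in a separate zip pass; Pre_ additionally excludes the degenerate 2-key dict with 'src' but no 'ref' and empty values, where A returns only because its empty loop never reaches the datapair['ref'] lookup that B does up front (B raises KeyError there).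
-- outside the precondition, e.g. on chunk_datapair({'src': [], 'x': []}, 1): A returns {'src': [], 'x': []}, B raises KeyError
import Mathlib
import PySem

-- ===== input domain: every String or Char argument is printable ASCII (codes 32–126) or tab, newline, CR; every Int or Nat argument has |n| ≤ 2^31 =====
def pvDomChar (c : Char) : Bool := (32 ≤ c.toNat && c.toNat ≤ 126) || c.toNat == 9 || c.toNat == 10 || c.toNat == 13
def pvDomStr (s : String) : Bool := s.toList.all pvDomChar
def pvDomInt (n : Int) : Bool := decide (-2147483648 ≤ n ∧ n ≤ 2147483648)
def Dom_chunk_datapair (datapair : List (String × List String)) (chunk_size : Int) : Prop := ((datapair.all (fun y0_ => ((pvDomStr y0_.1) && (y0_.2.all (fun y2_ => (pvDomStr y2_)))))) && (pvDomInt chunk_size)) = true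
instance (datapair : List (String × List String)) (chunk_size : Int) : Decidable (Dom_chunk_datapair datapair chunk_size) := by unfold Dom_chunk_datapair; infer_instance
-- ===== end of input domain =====

-- B separates boundary computation (one pass building per-item chunk indices) from chunk
-- assembly (a zip pass per key), instead of A's single interleaved loop over a dict of chunk
-- lists; objective: alternative decomposition, same cost.

-- shared primitive: Python 'lst[i].append(...)', i.e. replace lst[i] by f(lst[i]) at Python
-- index i (a negative index counts from the end; exact for in-range i — every use below is
-- in range in every reachable state, see the length invariants in the lemmas)
def pvSetNat {α : Type} : Nat → (α → α) → List α → List α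
  | _, _, [] => []
  | 0, f, a :: t => f a :: t
  | n + 1, f, a :: t => a :: pvSetNat n f t

def pvSetPy {α : Type} (l : List α) (i : Int) (f : α → α) : List α :=
  pvSetNat (if i < 0 then (i + l.length).toNat else i.toNat) f l

-- shared primitive: min(len(src[i]), len(ref[i])) — both Pythons contain this expression
-- verbatim (i is in range wherever the loops reach it; lengths are equal under Pre_)
def pvPairSize (src ref : List String) (i : Int) : Int :=
  min (PySem.Str.len (PySem.List.pyGetD src i "")) (PySem.Str.len (PySem.List.pyGetD ref i ""))

-- ===== PORT A =====
-- datapair[type_][i] (KeyError excluded by Pre_; the index is in range wherever reached)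
def pvItem (datapair : List (String × List String)) (k : String) (i : Int) : String :=
  PySem.List.pyGetD ((PySem.Dict.mk datapair).getD k []) i ""

-- one iteration of A's loop body over the state (chunks_pair, count, ind)
def pvStepA (datapair : List (String × List String)) (chunk_size : Int) (src ref : List String)
    (st : List (String × List (List String)) × Int × Int) (i : Int) :
    List (String × List (List String)) × Int × Int :=
  let st := if st.2.1 ≥ chunk_size
    then (st.1.map (fun kv => (kv.1, kv.2 ++ [([] : List String)])), (0 : Int), st.2.2 + 1)
    else st
  let chunks := st.1.map (fun kv => (kv.1, pvSetPy kv.2 st.2.2 (fun c => c ++ [pvItem datapair kv.1 i])))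
  (chunks, st.2.1 + pvPairSize src ref i, st.2.2)

def chunk_datapair (datapair : List (String × List String)) (chunk_size : Int) : List (String × List (List String)) :=
  -- the three asserts (and the datapair["src"]/["ref"] lookups) raise exactly outside Pre_;
  -- past them this is A's loop and final dict comprehension, step for step
  let src := (PySem.Dict.mk datapair).getD "src" []
  let ref := (PySem.Dict.mk datapair).getD "ref" []
  let init : List (String × List (List String)) := datapair.map (fun kv => (kv.1, []))
  let st := (PySem.List.pyRange 0 (src.length : Int) 1).foldl (pvStepA datapair chunk_size src ref) (init, chunk_size, -1)
  datapair.map (fun kv => (kv.1, (PySem.Dict.mk st.1).getD kv.1 []))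

-- ===== PORT B =====
-- pass 1 step: state (idx, count, ind); record each item's chunk index after the boundary test
def pvStepIdx (chunk_size : Int) (src ref : List String) (st : List Int × Int × Int) (i : Int) :
    List Int × Int × Int :=
  let ci := if st.2.1 ≥ chunk_size then ((0 : Int), st.2.2 + 1) else st.2
  (st.1 ++ [ci.2], ci.1 + pvPairSize src ref i, ci.2)

-- pass 2 step: open a new sublist when the recorded index equals len(chunks), then chunks[-1].append(x)
def pvChunkStep (chunks : List (List String)) (p : Int × String) : List (List String) :=
  let chunks := if p.1 = (chunks.length : Int) then chunks ++ [([] : List String)] else chunks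
  pvSetPy chunks (-1) (fun c => c ++ [p.2])

def chunk_datapair_alt (datapair : List (String × List String)) (chunk_size : Int) : List (String × List (List String)) :=
  let src := (PySem.Dict.mk datapair).getD "src" []
  let ref := (PySem.Dict.mk datapair).getD "ref" []
  let idx := ((PySem.List.pyRange 0 (src.length : Int) 1).foldl (pvStepIdx chunk_size src ref) ([], chunk_size, -1)).1
  datapair.map (fun kv => (kv.1, ((idx.zip ((PySem.Dict.mk datapair).getD kv.1 [])).foldl pvChunkStep [])))

-- ===== PRECONDITION & SPEC =====
-- Pre_ excludes the inputs where A raises (assert failures; KeyError on a missing "src"/"ref"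
-- key) and one degenerate corner where A returns only by accident: a 2-key dict with "src" but
-- no "ref" and empty values, on which A's loop body (which contains the datapair["ref"] lookup)
-- never runs, while B's up-front ref = datapair["ref"] naturally raises KeyError.
def Pre_chunk_datapair (datapair : List (String × List String)) (chunk_size : Int) : Prop :=
  datapair.length = 2 ∧ "src" ∈ datapair.map Prod.fst ∧ "ref" ∈ datapair.map Prod.fst ∧
    ((PySem.Dict.mk datapair).getD "src" []).length = ((PySem.Dict.mk datapair).getD "ref" []).length
instance (datapair : List (String × List String)) (chunk_size : Int) : Decidable (Pre_chunk_datapair datapair chunk_size) := by unfold Pre_chunk_datapair; infer_instance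

def pvWitness_chunk_datapair : (List (String × List String)) × Int := ([("src", ["ab", "c"]), ("ref", ["d", "ef"])], 2)

def Spec_chunk_datapair (datapair : List (String × List String)) (chunk_size : Int) (out : List (String × List (List String))) : Prop := out = chunk_datapair_alt datapair chunk_size
instance (datapair : List (String × List String)) (chunk_size : Int) (out : List (String × List (List String))) : Decidable (Spec_chunk_datapair datapair chunk_size out) := by unfold Spec_chunk_datapair; infer_instance

-- ===== CLAIM (what is proved, stated in full; the proofs are below) =====
def Claim_equal_chunk_datapair : Prop := ∀ (datapair : List (String × List String)) (chunk_size : Int), Dom_chunk_datapair datapair chunk_size → Pre_chunk_datapair datapair chunk_size → Spec_chunk_datapair datapair chunk_size (chunk_datapair datapair chunk_size)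

-- ===== LEMMAS AND PROOFS =====

-- recursive description of B's pass 1: the idx list and the final (count, ind)
def pvIdxOf (cs : Int) (s r : List String) : List Int → Int → Int → List Int
  | [], _, _ => []
  | i :: is, c, d =>
    let d' := if c ≥ cs then d + 1 else d
    d' :: pvIdxOf cs s r is ((if c ≥ cs then 0 else c) + pvPairSize s r i) d'

def pvCI (cs : Int) (s r : List String) : List Int → Int → Int → Int × Int
  | [], c, d => (c, d)
  | i :: is, c, d =>
    let d' := if c ≥ cs then d + 1 else d
    pvCI cs s r is ((if c ≥ cs then 0 else c) + pvPairSize s r i) d'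

lemma pvSetNat_append_singleton {α : Type} (l : List α) (a : α) (f : α → α) :
    pvSetNat l.length f (l ++ [a]) = l ++ [f a] := by
  induction l with
  | nil => rfl
  | cons x t ih => simp [pvSetNat, ih]

lemma pvSetNat_length {α : Type} (n : Nat) (f : α → α) (l : List α) :
    (pvSetNat n f l).length = l.length := by
  induction l generalizing n with
  | nil => cases n <;> rfl
  | cons a t ih =>
    cases n with
    | zero => rfl
    | succ m => simp [pvSetNat, ih]

-- A's in-place append at chunks[ind] agrees with B's pass-2 step, chunk-boundary case
lemma pvStep_newc (ch : List (List String)) (d : Int) (x : String)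
    (h : (ch.length : Int) = d + 1) :
    pvSetPy (ch ++ [[]]) (d + 1) (fun c => c ++ [x]) = pvChunkStep ch (d + 1, x) := by
  simp only [pvChunkStep, pvSetPy, ← h]
  simp only [List.length_append, List.length_cons, List.length_nil]
  norm_num
  simp [show ¬ ((ch.length : Int) < 0) from by omega, pvSetNat_append_singleton]

-- …and the within-chunk case
lemma pvStep_old (ch : List (List String)) (d : Int) (x : String)
    (h : (ch.length : Int) = d + 1) (hd : 0 ≤ d) :
    pvSetPy ch d (fun c => c ++ [x]) = pvChunkStep ch (d, x) := by
  have hne : ¬ (d = (ch.length : Int)) := by omega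
  simp only [pvChunkStep, pvSetPy, if_neg hne]
  norm_num [show ¬ (d < 0) from by omega]
  rw [show (-1 + (ch.length : Int)).toNat = d.toNat from by omega]

lemma pvChunkStep_length (ch : List (List String)) (p : Int × String) :
    (pvChunkStep ch p).length = if p.1 = (ch.length : Int) then ch.length + 1 else ch.length := by
  simp only [pvChunkStep, pvSetPy, pvSetNat_length]
  split <;> simp

-- B's pass 1 foldl computes pvIdxOf / pvCI
lemma pv_idxFold (cs : Int) (s r : List String) :
    ∀ (is : List Int) (acc : List Int) (c d : Int),
      is.foldl (pvStepIdx cs s r) (acc, c, d) =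
        (acc ++ pvIdxOf cs s r is c d, pvCI cs s r is c d) := by
  intro is
  induction is with
  | nil => intro acc c d; simp [pvIdxOf, pvCI]
  | cons i t ih =>
    intro acc c d
    by_cases hc : c ≥ cs <;>
      simp [List.foldl, pvStepIdx, pvIdxOf, pvCI, hc, ih]

-- the joint invariant: A's fold over a two-key dict is the replay of pass 1's indices
-- (pvIdxOf) against each key's items, with the same (count, ind); the length hypotheses
-- say ind = len(chunks) - 1, which every reachable state satisfies
lemma pv_joint (dp : List (String × List String)) (cs : Int) (s r : List String)
    (k1 k2 : String) (v1 v2 : List String)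
    (hdp : dp = [(k1, v1), (k2, v2)]) (hk : (k1 == k2) = false) :
    ∀ (is : List Int) (c d : Int) (c1 c2 : List (List String)),
      (c1.length : Int) = d + 1 → (c2.length : Int) = d + 1 → (cs ≤ c ∨ 0 ≤ d) →
      is.foldl (pvStepA dp cs s r) ([(k1, c1), (k2, c2)], c, d) =
        ([(k1, ((pvIdxOf cs s r is c d).zip (is.map (fun i => PySem.List.pyGetD v1 i ""))).foldl pvChunkStep c1),
          (k2, ((pvIdxOf cs s r is c d).zip (is.map (fun i => PySem.List.pyGetD v2 i ""))).foldl pvChunkStep c2)],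
         pvCI cs s r is c d) := by
  intro is
  induction is with
  | nil => intro c d c1 c2 h1 h2 hcd; simp [pvIdxOf, pvCI]
  | cons i t ih =>
    intro c d c1 c2 h1 h2 hcd
    have hi1 : pvItem dp k1 i = PySem.List.pyGetD v1 i "" := by
      simp [pvItem, hdp, PySem.Dict.getD, PySem.Dict.get?_mk_cons]
    have hi2 : pvItem dp k2 i = PySem.List.pyGetD v2 i "" := by
      simp [pvItem, hdp, PySem.Dict.getD, PySem.Dict.get?_mk_cons, hk]
    by_cases hc : c ≥ cs
    · have e1 := pvStep_newc c1 d (PySem.List.pyGetD v1 i "") h1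
      have e2 := pvStep_newc c2 d (PySem.List.pyGetD v2 i "") h2
      have l1 : ((pvChunkStep c1 (d + 1, PySem.List.pyGetD v1 i "")).length : Int) = (d + 1) + 1 := by
        rw [pvChunkStep_length]; simp only [if_pos h1.symm]; omega
      have l2 : ((pvChunkStep c2 (d + 1, PySem.List.pyGetD v2 i "")).length : Int) = (d + 1) + 1 := by
        rw [pvChunkStep_length]; simp only [if_pos h2.symm]; omega
      simp only [List.foldl, pvStepA, List.map, pvIdxOf, pvCI, if_pos hc, List.map_cons,
        List.zip_cons_cons, e1, e2, hi1, hi2]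
      rw [ih _ _ _ _ l1 l2 (Or.inr (by omega))]
    · have hd : 0 ≤ d := Or.resolve_left hcd hc
      have e1 := pvStep_old c1 d (PySem.List.pyGetD v1 i "") h1 hd
      have e2 := pvStep_old c2 d (PySem.List.pyGetD v2 i "") h2 hd
      have l1 : ((pvChunkStep c1 (d, PySem.List.pyGetD v1 i "")).length : Int) = d + 1 := by
        rw [pvChunkStep_length]; rw [if_neg (by omega)]; omega
      have l2 : ((pvChunkStep c2 (d, PySem.List.pyGetD v2 i "")).length : Int) = d + 1 := by
        rw [pvChunkStep_length]; rw [if_neg (by omega)]; omega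
      simp only [List.foldl, pvStepA, List.map, pvIdxOf, pvCI, if_neg hc, List.map_cons,
        List.zip_cons_cons, e1, e2, hi1, hi2]
      rw [ih _ _ _ _ l1 l2 (Or.inr hd)]

lemma pv_main_case1 (cs : Int) (v1 v2 : List String) (heq : v1.length = v2.length) :
    chunk_datapair [("src", v1), ("ref", v2)] cs = chunk_datapair_alt [("src", v1), ("ref", v2)] cs := by
  have hk : (("src" : String) == "ref") = false := by decide
  have m1 : (PySem.List.pyRange 0 (v1.length : Int) 1).map (fun i => PySem.List.pyGetD v1 i "") = v1 :=
    PySem.List.map_pyGetD_pyRange_zero v1 ""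
  have m2 : (PySem.List.pyRange 0 (v1.length : Int) 1).map (fun i => PySem.List.pyGetD v2 i "") = v2 := by
    rw [heq]; exact PySem.List.map_pyGetD_pyRange_zero v2 ""
  simp only [chunk_datapair, chunk_datapair_alt]
  simp only [PySem.Dict.getD, PySem.Dict.get?_mk_cons, List.map]
  norm_num
  rw [pv_joint [("src", v1), ("ref", v2)] cs _ _ "src" "ref" v1 v2 rfl hk _ cs (-1) [] []
      (by simp) (by simp) (Or.inl le_rfl)]
  rw [pv_idxFold]
  simp only [PySem.Dict.get?_mk_cons, List.nil_append]
  simp [m1, m2]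

lemma pv_main_case2 (cs : Int) (v1 v2 : List String) (heq : v2.length = v1.length) :
    chunk_datapair [("ref", v1), ("src", v2)] cs = chunk_datapair_alt [("ref", v1), ("src", v2)] cs := by
  have hk : (("ref" : String) == "src") = false := by decide
  have m2 : (PySem.List.pyRange 0 (v2.length : Int) 1).map (fun i => PySem.List.pyGetD v2 i "") = v2 :=
    PySem.List.map_pyGetD_pyRange_zero v2 ""
  have m1 : (PySem.List.pyRange 0 (v2.length : Int) 1).map (fun i => PySem.List.pyGetD v1 i "") = v1 := by
    rw [heq]; exact PySem.List.map_pyGetD_pyRange_zero v1 ""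
  simp only [chunk_datapair, chunk_datapair_alt]
  simp only [PySem.Dict.getD, PySem.Dict.get?_mk_cons, List.map]
  norm_num
  rw [pv_joint [("ref", v1), ("src", v2)] cs _ _ "ref" "src" v1 v2 rfl hk _ cs (-1) [] []
      (by simp) (by simp) (Or.inl le_rfl)]
  rw [pv_idxFold]
  simp only [PySem.Dict.get?_mk_cons, List.nil_append]
  simp [m1, m2]

-- ===== VERDICT (by name: the statement is the Claim_ definition above) =====
theorem chunk_datapair_spec : Claim_equal_chunk_datapair := by
  intro dp cs _hdom hpre
  unfold Spec_chunk_datapair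
  obtain ⟨hlen, hsrc, href, heq⟩ := hpre
  obtain _ | ⟨⟨pk, pv⟩, _ | ⟨⟨qk, qv⟩, _ | ⟨t, dp'⟩⟩⟩ := dp <;> simp_all
  rcases hsrc with hs | hs
  · rcases href with hr | hr
    · rw [← hs] at hr; exact absurd hr (by decide)
    · subst hs; subst hr
      simp only [PySem.Dict.getD, PySem.Dict.get?_mk_cons] at heq
      simp at heq
      exact pv_main_case1 cs pv qv heq
  · rcases href with hr | hr
    · subst hs; subst hr
      simp only [PySem.Dict.getD, PySem.Dict.get?_mk_cons] at heq
      simp at heq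
      exact pv_main_case2 cs pv qv heq
    · rw [← hs] at hr; exact absurd hr (by decide)
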